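-- pv_equiv track=rewrite | github.com/jinhyung-noh/algorithm-ps | Programmers/모의고사.py | solution
-- ===== SOURCE A (Python) =====
-- def solution(answers):
--
--     supo_1 = [1,2,3,4,5];
--     supo_2 = [2,1,2,3,2,4,2,5];
--     supo_3 = [3,3,1,1,2,2,4,4,5,5];
--     ans_cnt = [0,0,0]; # answ_cnt[i-1]: i번째 수포자의 정답 개수
--
--     # answer를 돌면서 각각 정답 확인
--     for idx in range(len(answers)):
--         answer = answers[idx]
--         # 1번 수포자 정답 체크
--         if supo_1[idx % 5] == answer:
--             ans_cnt[0] += 1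
--         # 2번 수포자 정답 체크
--         if supo_2[idx % 8] == answer:
--             ans_cnt[1] += 1
--         # 3번 수포자 정답 체크
--         if supo_3[idx % 10] == answer:
--             ans_cnt[2] += 1
--
--     # 가장 많이 맞힌 사람 확인
--     result = []
--     max_score = max(ans_cnt)
--     for i in range(3):
--         if ans_cnt[i] == max_score:
--             result.append(i+1)
--
--     return result
-- ===== SOURCE B (Python) =====
-- def solution(answers):
--     # Frequency table keyed by (position mod 40, given answer); 40 = lcm(5, 8, 10),
--     # the common period of the three answering patterns.  One pass over answers
--     # builds the table; each score is then 40 table lookups, no rescan of answers.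
--     PERIOD = 40
--     freq = {}
--     for i, a in enumerate(answers):
--         k = (i % PERIOD, a)
--         freq[k] = freq.get(k, 0) + 1
--     patterns = [[1, 2, 3, 4, 5],
--                 [2, 1, 2, 3, 2, 4, 2, 5],
--                 [3, 3, 1, 1, 2, 2, 4, 4, 5, 5]]
--     scores = []
--     for p in patterns:
--         scores.append(sum(freq.get((r, p[r % len(p)]), 0) for r in range(PERIOD)))
--     best = max(scores)
--     return [i + 1 for i in range(3) if scores[i] == best]
-- ===== Notes on version B (the rewrite author's own statement) =====
-- stated objective: alternative
-- what changed: B builds a hash frequency table keyed by (index mod 40, answer) in one pass (40 = lcm of the three pattern periods) and computes each score as 40 table lookups, instead of A's loop that compares every answer against all three patterns; the per-answer pattern comparisons disappear.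
import Mathlib
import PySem

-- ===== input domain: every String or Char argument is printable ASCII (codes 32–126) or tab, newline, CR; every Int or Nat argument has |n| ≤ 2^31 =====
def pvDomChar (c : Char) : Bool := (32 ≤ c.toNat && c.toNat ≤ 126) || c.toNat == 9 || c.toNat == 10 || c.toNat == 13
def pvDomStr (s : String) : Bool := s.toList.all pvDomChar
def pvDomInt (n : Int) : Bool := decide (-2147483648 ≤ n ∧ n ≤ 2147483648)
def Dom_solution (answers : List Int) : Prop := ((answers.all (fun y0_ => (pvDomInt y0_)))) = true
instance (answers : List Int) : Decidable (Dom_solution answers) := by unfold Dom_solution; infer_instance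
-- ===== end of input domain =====

-- B replaces A's per-answer comparison against all three patterns by a frequency
-- table keyed by (index mod 40, answer) built in one pass, each score then being
-- 40 table lookups (objective: alternative algorithm, same asymptotic cost).

-- ===== PORT A =====
-- 'for idx in range(len(answers)): answer = answers[idx]; if supo_k[idx % m] == answer: …'
-- ported as a fold over pyRange, indexing via pyGetD (every index is in range)
def solution (answers : List Int) : List Int :=
  let supo1 : List Int := [1, 2, 3, 4, 5]
  let supo2 : List Int := [2, 1, 2, 3, 2, 4, 2, 5]
  let supo3 : List Int := [3, 3, 1, 1, 2, 2, 4, 4, 5, 5]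
  let cnt := (PySem.List.pyRange 0 (answers.length : Int) 1).foldl
    (fun (c : Int × Int × Int) idx =>
      let answer := PySem.List.pyGetD answers idx 0
      ( if PySem.List.pyGetD supo1 (idx % 5) 0 == answer then c.1 + 1 else c.1,
        if PySem.List.pyGetD supo2 (idx % 8) 0 == answer then c.2.1 + 1 else c.2.1,
        if PySem.List.pyGetD supo3 (idx % 10) 0 == answer then c.2.2 + 1 else c.2.2 ))
    (0, 0, 0)
  let ansCnt : List Int := [cnt.1, cnt.2.1, cnt.2.2]
  let maxScore := (PySem.List.max? ansCnt (fun y => y)).getD 0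
  (PySem.List.pyRange 0 3 1).foldl
    (fun r i => if PySem.List.pyGetD ansCnt i 0 == maxScore then r ++ [i + 1] else r) []

-- ===== PORT B =====
-- 'freq[k] = freq.get(k, 0) + 1' over enumerate(answers), k = (i % 40, a)
def bFreq (answers : List Int) : PySem.Dict (Int × Int) Int :=
  (PySem.List.enumerate answers 0).foldl
    (fun d ia =>
      let k : Int × Int := (ia.1 % 40, ia.2)
      d.insert k (d.getD k 0 + 1))
    PySem.Dict.empty

-- sum(freq.get((r, p[r % len(p)]), 0) for r in range(40))
def bScore (freq : PySem.Dict (Int × Int) Int) (p : List Int) : Int :=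
  (PySem.List.pyRange 0 40 1).foldl
    (fun s r => s + freq.getD (r, PySem.List.pyGetD p (r % (p.length : Int)) 0) 0) 0

def solution_alt (answers : List Int) : List Int :=
  let freq := bFreq answers
  let patterns : List (List Int) :=
    [[1, 2, 3, 4, 5], [2, 1, 2, 3, 2, 4, 2, 5], [3, 3, 1, 1, 2, 2, 4, 4, 5, 5]]
  let scores := patterns.foldl (fun sc p => sc ++ [bScore freq p]) []
  let best := (PySem.List.max? scores (fun y => y)).getD 0
  (PySem.List.pyRange 0 3 1).foldl
    (fun r i => if PySem.List.pyGetD scores i 0 == best then r ++ [i + 1] else r) []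

-- ===== PRECONDITION & SPEC =====
def Spec_solution (answers : List Int) (out : List Int) : Prop := out = solution_alt answers
instance (answers : List Int) (out : List Int) : Decidable (Spec_solution answers out) := by unfold Spec_solution; infer_instance

-- ===== CLAIM (what is proved, stated in full; the proofs are below) =====
def Claim_equal_solution : Prop := ∀ (answers : List Int), Dom_solution answers → Spec_solution answers (solution answers)

-- ===== LEMMAS AND PROOFS =====

theorem foldl_add_sum {α : Type} (h : α → Int) (ls : List α) (c : Int) :
    ls.foldl (fun s r => s + h r) c = c + (ls.map h).sum := by
  induction ls generalizing c with
  | nil => simp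
  | cons r t ih => simp only [List.foldl_cons, ih, List.map_cons, List.sum_cons]; ring

theorem step_eq (x y c : Int) :
    (if x == y then c + 1 else c) = c + (if x == y then 1 else 0) := by
  split <;> simp

-- A's combined loop splits into three independent per-pattern counting folds
theorem fold3 (s1 s2 s3 : List Int) (l : List (Int × Int)) (c0 c1 c2 : Int) :
    l.foldl
      (fun (c : Int × Int × Int) x =>
        ( if PySem.List.pyGetD s1 (x.1 % 5) 0 == x.2 then c.1 + 1 else c.1,
          if PySem.List.pyGetD s2 (x.1 % 8) 0 == x.2 then c.2.1 + 1 else c.2.1,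
          if PySem.List.pyGetD s3 (x.1 % 10) 0 == x.2 then c.2.2 + 1 else c.2.2 ))
      (c0, c1, c2)
    = ( l.foldl (fun s x => s + (if PySem.List.pyGetD s1 (x.1 % 5) 0 == x.2 then 1 else 0)) c0,
        l.foldl (fun s x => s + (if PySem.List.pyGetD s2 (x.1 % 8) 0 == x.2 then 1 else 0)) c1,
        l.foldl (fun s x => s + (if PySem.List.pyGetD s3 (x.1 % 10) 0 == x.2 then 1 else 0)) c2 ) := by
  induction l generalizing c0 c1 c2 with
  | nil => rfl
  | cons a t ih =>
      rw [List.foldl_cons, ih]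
      simp only [List.foldl_cons]
      rw [step_eq, step_eq, step_eq]

-- a 0/1 indicator summed over a list not containing the key's residue is 0
theorem sum_ind_zero (g : Int → Int) (mv : Int × Int) (ls : List Int) (hnm : mv.1 ∉ ls) :
    (ls.map (fun r => if mv == ((r, g r) : Int × Int) then (1 : Int) else 0)).sum = 0 := by
  induction ls with
  | nil => simp
  | cons r0 t ih =>
      have h0 : (mv == ((r0, g r0) : Int × Int)) = false := by
        simp only [beq_eq_false_iff_ne, ne_eq]
        intro h; exact hnm (by simp [h])
      rw [List.map_cons, List.sum_cons, h0]
      simp only [Bool.false_eq_true, if_false, zero_add]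
      exact ih (fun h => hnm (List.mem_cons_of_mem _ h))

-- summing the indicator over a nodup list containing the residue picks out one term
theorem sum_ind (g : Int → Int) (mv : Int × Int) (ls : List Int)
    (hnd : ls.Nodup) (hm : mv.1 ∈ ls) :
    (ls.map (fun r => if mv == ((r, g r) : Int × Int) then (1 : Int) else 0)).sum
      = if mv.2 == g mv.1 then 1 else 0 := by
  induction ls with
  | nil => cases hm
  | cons r0 t ih =>
      rcases List.nodup_cons.mp hnd with ⟨hr0, hndt⟩
      by_cases h : mv.1 = r0
      · have hz : (t.map (fun r => if mv == ((r, g r) : Int × Int) then (1 : Int) else 0)).sum = 0 :=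
          sum_ind_zero g mv t (by rw [h]; exact hr0)
        have hbeq : (mv == ((r0, g r0) : Int × Int)) = (mv.2 == g mv.1) := by
          cases mv with
          | mk a b =>
              simp only at h
              subst h
              simp [Prod.ext_iff]
        simp only [List.map_cons, List.sum_cons, hbeq, hz, add_zero]
      · have hmt : mv.1 ∈ t := by
          rcases List.mem_cons.mp hm with h' | h'
          · exact absurd h' h
          · exact h'
        have h0 : (mv == ((r0, g r0) : Int × Int)) = false := by
          simp only [beq_eq_false_iff_ne, ne_eq]
          intro hh; exact h (by rw [hh])
        rw [List.map_cons, List.sum_cons, h0]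
        simp only [Bool.false_eq_true, if_false, zero_add]
        exact ih hndt hmt

-- the frequency table's lookups are counts over the keyed list
theorem bFreq_getD (answers : List Int) (v : Int × Int) :
    (bFreq answers).getD v 0
      = (((PySem.List.enumerate answers 0).map (fun ia => ((ia.1 % 40, ia.2) : Int × Int))).count v : Int) := by
  unfold bFreq
  rw [← List.foldl_map (f := fun ia : Int × Int => ((ia.1 % 40, ia.2) : Int × Int))
      (g := fun (d : PySem.Dict (Int × Int) Int) x => d.insert x (d.getD x 0 + 1))]
  rw [PySem.Dict.getD_foldl_insert_add_one]
  simp [List.count_eq_countP]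

-- CENTRAL: summing the keyed counts over one full period equals the direct per-pattern count
theorem central (p : List Int)
    (hdvd : ∀ i : Int, i % 40 % (p.length : Int) = i % (p.length : Int))
    (l : List (Int × Int)) :
    (PySem.List.pyRange 0 40 1).foldl
      (fun s r => s +
        ((l.map (fun ia => ((ia.1 % 40, ia.2) : Int × Int))).count
          ((r, PySem.List.pyGetD p (r % (p.length : Int)) 0) : Int × Int) : Int)) 0
    = l.foldl (fun s x => s + (if PySem.List.pyGetD p (x.1 % (p.length : Int)) 0 == x.2 then 1 else 0)) 0 := by
  induction l with
  | nil => simp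
  | cons x t ih =>
      rw [List.foldl_cons]
      rw [foldl_add_sum, foldl_add_sum]
      rw [foldl_add_sum, foldl_add_sum] at ih
      set g : Int → Int := fun r => PySem.List.pyGetD p (r % (p.length : Int)) 0 with hg
      have hcnt : ∀ r : Int,
          (((x :: t).map (fun ia => ((ia.1 % 40, ia.2) : Int × Int))).count ((r, g r) : Int × Int) : Int)
          = ((t.map (fun ia => ((ia.1 % 40, ia.2) : Int × Int))).count ((r, g r) : Int × Int) : Int)
            + (if ((x.1 % 40, x.2) : Int × Int) == (r, g r) then 1 else 0) := by
        intro r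
        rw [List.map_cons, List.count_cons]
        push_cast
        split <;> simp_all
      have hsplit :
          ((PySem.List.pyRange 0 40 1).map (fun r =>
            (((x :: t).map (fun ia => ((ia.1 % 40, ia.2) : Int × Int))).count ((r, g r) : Int × Int) : Int))).sum
          = ((PySem.List.pyRange 0 40 1).map (fun r =>
              ((t.map (fun ia => ((ia.1 % 40, ia.2) : Int × Int))).count ((r, g r) : Int × Int) : Int))).sum
            + ((PySem.List.pyRange 0 40 1).map (fun r =>
              (if ((x.1 % 40, x.2) : Int × Int) == ((r, g r) : Int × Int) then (1 : Int) else 0))).sum := by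
        rw [← PySem.List.sum_map_add_int]
        congr 1
        exact List.map_congr_left (fun r _ => hcnt r)
      have hmem : ((x.1 % 40, x.2) : Int × Int).1 ∈ PySem.List.pyRange 0 40 1 := by
        rw [PySem.List.mem_pyRange_one]
        exact ⟨Int.emod_nonneg x.1 (by norm_num), Int.emod_lt_of_pos x.1 (by norm_num)⟩
      have hone : ((PySem.List.pyRange 0 40 1).map (fun r =>
              (if ((x.1 % 40, x.2) : Int × Int) == ((r, g r) : Int × Int) then (1 : Int) else 0))).sum
          = if x.2 == g (x.1 % 40) then 1 else 0 :=
        sum_ind g ((x.1 % 40, x.2) : Int × Int) (PySem.List.pyRange 0 40 1)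
          (PySem.List.nodup_pyRange_one 0 40) hmem
      have hgval : g (x.1 % 40) = PySem.List.pyGetD p (x.1 % (p.length : Int)) 0 := by
        rw [hg]; simp only [hdvd x.1]
      have hflip : ((x.2 == PySem.List.pyGetD p (x.1 % (p.length : Int)) 0) : Bool)
          = (PySem.List.pyGetD p (x.1 % (p.length : Int)) 0 == x.2) := by
        by_cases hv : x.2 = PySem.List.pyGetD p (x.1 % (p.length : Int)) 0
        · rw [hv]
        · have h1 : (x.2 == PySem.List.pyGetD p (x.1 % (p.length : Int)) 0) = false := by
            simpa using hv
          have h2 : (PySem.List.pyGetD p (x.1 % (p.length : Int)) 0 == x.2) = false := by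
            simpa using fun hh => hv hh.symm
          rw [h1, h2]
      rw [hsplit, hone, hgval, hflip]
      linarith [ih]

-- B's score for a pattern equals the direct counting fold over enumerate(answers)
theorem bScore_eq (answers : List Int) (p : List Int)
    (hdvd : ∀ i : Int, i % 40 % (p.length : Int) = i % (p.length : Int)) :
    bScore (bFreq answers) p
      = (PySem.List.enumerate answers 0).foldl
          (fun s x => s + (if PySem.List.pyGetD p (x.1 % (p.length : Int)) 0 == x.2 then 1 else 0)) 0 := by
  unfold bScore
  rw [← central p hdvd]
  congr 1
  funext s r
  rw [bFreq_getD]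

-- the shared tail of both ports: max of the three scores, then the leaders
def finish3 (c : Int × Int × Int) : List Int :=
  let l : List Int := [c.1, c.2.1, c.2.2]
  let m := (PySem.List.max? l (fun y => y)).getD 0
  (PySem.List.pyRange 0 3 1).foldl
    (fun r i => if PySem.List.pyGetD l i 0 == m then r ++ [i + 1] else r) []

-- A's index loop is the same fold over enumerate(answers)
theorem Afold_eq (answers : List Int) (init : Int × Int × Int) :
    (PySem.List.pyRange 0 (PySem.List.len answers) 1).foldl
      (fun (c : Int × Int × Int) idx =>
        ( if PySem.List.pyGetD [1, 2, 3, 4, 5] (idx % 5) 0 == PySem.List.pyGetD answers idx 0 then c.1 + 1 else c.1,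
          if PySem.List.pyGetD [2, 1, 2, 3, 2, 4, 2, 5] (idx % 8) 0 == PySem.List.pyGetD answers idx 0 then c.2.1 + 1 else c.2.1,
          if PySem.List.pyGetD [3, 3, 1, 1, 2, 2, 4, 4, 5, 5] (idx % 10) 0 == PySem.List.pyGetD answers idx 0 then c.2.2 + 1 else c.2.2 )) init
    = (PySem.List.enumerate answers 0).foldl
      (fun (c : Int × Int × Int) x =>
        ( if PySem.List.pyGetD [1, 2, 3, 4, 5] (x.1 % 5) 0 == x.2 then c.1 + 1 else c.1,
          if PySem.List.pyGetD [2, 1, 2, 3, 2, 4, 2, 5] (x.1 % 8) 0 == x.2 then c.2.1 + 1 else c.2.1,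
          if PySem.List.pyGetD [3, 3, 1, 1, 2, 2, 4, 4, 5, 5] (x.1 % 10) 0 == x.2 then c.2.2 + 1 else c.2.2 )) init := by
  rw [PySem.List.enumerate_eq_map_pyRange answers 0, List.foldl_map]

-- ===== VERDICT (by name: the statement is the Claim_ definition above) =====
theorem solution_spec : Claim_equal_solution := by
  intro answers _
  show solution answers = solution_alt answers
  show finish3
      ((PySem.List.pyRange 0 (PySem.List.len answers) 1).foldl
        (fun (c : Int × Int × Int) idx =>
          ( if PySem.List.pyGetD [1, 2, 3, 4, 5] (idx % 5) 0 == PySem.List.pyGetD answers idx 0 then c.1 + 1 else c.1,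
            if PySem.List.pyGetD [2, 1, 2, 3, 2, 4, 2, 5] (idx % 8) 0 == PySem.List.pyGetD answers idx 0 then c.2.1 + 1 else c.2.1,
            if PySem.List.pyGetD [3, 3, 1, 1, 2, 2, 4, 4, 5, 5] (idx % 10) 0 == PySem.List.pyGetD answers idx 0 then c.2.2 + 1 else c.2.2 )) (0, 0, 0))
    = finish3
      ( bScore (bFreq answers) [1, 2, 3, 4, 5],
        bScore (bFreq answers) [2, 1, 2, 3, 2, 4, 2, 5],
        bScore (bFreq answers) [3, 3, 1, 1, 2, 2, 4, 4, 5, 5] )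
  refine congrArg finish3 ?_
  rw [Afold_eq, fold3]
  rw [bScore_eq answers [1, 2, 3, 4, 5] (by intro i; simp only [List.length_cons, List.length_nil]; omega),
      bScore_eq answers [2, 1, 2, 3, 2, 4, 2, 5] (by intro i; simp only [List.length_cons, List.length_nil]; omega),
      bScore_eq answers [3, 3, 1, 1, 2, 2, 4, 4, 5, 5] (by intro i; simp only [List.length_cons, List.length_nil]; omega)]
  norm_num
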